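-- pv_equiv track=rewrite | github.com/openjamoses/Data-swapping | src/models/v3/utility_functions.py | subclass_probablity
-- ===== SOURCE A (Python) =====
-- def subclass_probablity(x_test, y_test, y_pred, sensitive_index):
--     data = {}
--     for i in range(len(x_test)):
--         if x_test[i][sensitive_index] in data.keys():
--             if y_pred[i] in data[x_test[i][sensitive_index]].keys():
--                 if y_test[i] in data[x_test[i][sensitive_index]][y_pred[i]].keys():
--                     data[x_test[i][sensitive_index]][y_pred[i]][y_test[i]] += 1
--                 else:
--                     data[x_test[i][sensitive_index]][y_pred[i]][y_test[i]] = 1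
--             else:
--                 data[x_test[i][sensitive_index]][y_pred[i]] = {}
--                 data[x_test[i][sensitive_index]][y_pred[i]][y_test[i]] = 1
--         else:
--             data[x_test[i][sensitive_index]] = {}
--             data[x_test[i][sensitive_index]][y_pred[i]] = {}
--             data[x_test[i][sensitive_index]][y_pred[i]][y_test[i]] = 1
--
--         #data[x_test[i][sensitive_index]][y_pred[i]][y_test[i]] = data.get([x_test[i][sensitive_index]][y_pred[i]][y_test[i]], 0) + 1
--     return data
-- ===== SOURCE B (Python) =====
-- def subclass_probablity(x_test, y_test, y_pred, sensitive_index):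
--     # group-by decomposition: extract the (sensitive, pred, true) triples once,
--     # then build the nested dict level by level from the deduplicated key lists
--     triples = [(row[sensitive_index], y_pred[i], y_test[i])
--                for i, row in enumerate(x_test)]
--     out = {}
--     for s in dict.fromkeys(s2 for (s2, _, _) in triples):
--         by_s = [(p2, t2) for (s2, p2, t2) in triples if s2 == s]
--         inner = {}
--         for p in dict.fromkeys(p2 for (p2, _) in by_s):
--             by_p = [t2 for (p2, t2) in by_s if p2 == p]
--             inner[p] = {t: by_p.count(t) for t in dict.fromkeys(by_p)}
--         out[s] = inner
--     return out
-- ===== Notes on version B (the rewrite author's own statement) =====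
-- stated objective: alternative
-- what changed: A builds the nested dict incrementally in one pass with a three-deep membership/if chain; B extracts the (sensitive, pred, true) triples once and then assembles the nested dict declaratively by group-by: deduplicated key lists per level, filters per group and a count per innermost cell.
import Mathlib
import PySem

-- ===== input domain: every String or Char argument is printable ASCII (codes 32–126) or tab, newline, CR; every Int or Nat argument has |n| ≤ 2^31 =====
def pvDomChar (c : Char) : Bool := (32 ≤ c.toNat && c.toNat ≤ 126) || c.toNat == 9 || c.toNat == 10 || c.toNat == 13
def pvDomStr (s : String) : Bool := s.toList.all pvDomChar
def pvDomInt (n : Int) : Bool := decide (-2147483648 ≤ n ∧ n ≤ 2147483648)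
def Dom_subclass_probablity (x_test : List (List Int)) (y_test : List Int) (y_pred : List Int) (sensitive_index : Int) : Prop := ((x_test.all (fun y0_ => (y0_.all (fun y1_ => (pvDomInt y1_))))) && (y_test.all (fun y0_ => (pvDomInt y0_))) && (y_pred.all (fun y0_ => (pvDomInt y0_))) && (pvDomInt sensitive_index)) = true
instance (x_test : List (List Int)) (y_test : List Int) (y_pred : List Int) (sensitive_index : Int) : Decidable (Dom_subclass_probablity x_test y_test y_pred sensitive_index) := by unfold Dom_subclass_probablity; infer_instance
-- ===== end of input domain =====

-- B replaces A's one-pass nested-if dict building by a declarative group-by (dedup key lists, filters, counts); same result, no speed claim.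

-- ===== PORT A =====
-- Literal port of A's single loop over range(len(x_test)) with the three-deep membership chain.
-- pyGetD _ _ 0: the indexings x_test[i][sensitive_index], y_pred[i], y_test[i] — Pre_ guarantees they are in
-- range, so the 0 default is never used there; the final .items maps convert the nested Dicts to assoc lists (type convention).
def subclass_probablity (x_test : List (List Int)) (y_test : List Int) (y_pred : List Int) (sensitive_index : Int) : List (Int × List (Int × List (Int × Int))) :=
  let data : PySem.Dict Int (PySem.Dict Int (PySem.Dict Int Int)) :=
    (List.range x_test.length).foldl (fun data i =>
      let s := PySem.List.pyGetD (x_test.getD i []) sensitive_index 0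
      let p := PySem.List.pyGetD y_pred (i : Int) 0
      let t := PySem.List.pyGetD y_test (i : Int) 0
      match data.get? s with
      | some inner =>
        match inner.get? p with
        | some inner2 =>
          match inner2.get? t with
          | some c => data.insert s (inner.insert p (inner2.insert t (c + 1)))
          | none   => data.insert s (inner.insert p (inner2.insert t 1))
        | none => data.insert s (inner.insert p (PySem.Dict.empty.insert t 1))
      | none => data.insert s ((PySem.Dict.empty : PySem.Dict Int (PySem.Dict Int Int)).insert p (PySem.Dict.empty.insert t 1))
      ) PySem.Dict.empty
  data.items.map (fun si => (si.1, si.2.items.map (fun pi => (pi.1, pi.2.items))))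

-- ===== PORT B =====
-- Literal port of Source B. A dict comprehension / dict-building loop whose keys come from dict.fromkeys(...)
-- (= PySem.List.dedup, distinct fresh keys in first-appearance order) is ported as the map over that
-- deduplicated list — exactly its items in insertion order.
def subclass_probablity_alt (x_test : List (List Int)) (y_test : List Int) (y_pred : List Int) (sensitive_index : Int) : List (Int × List (Int × List (Int × Int))) :=
  let triples : List (Int × Int × Int) :=
    (PySem.List.enumerate x_test).map (fun iw =>
      (PySem.List.pyGetD iw.2 sensitive_index 0,
       PySem.List.pyGetD y_pred iw.1 0,
       PySem.List.pyGetD y_test iw.1 0))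
  (PySem.List.dedup (triples.map (fun w => w.1))).map (fun s =>
    let by_s := (triples.filter (fun w => w.1 == s)).map (fun w => w.2)
    (s, (PySem.List.dedup (by_s.map (fun w => w.1))).map (fun p =>
      let by_p := (by_s.filter (fun w => w.1 == p)).map (fun w => w.2)
      (p, (PySem.List.dedup by_p).map (fun t => (t, (PySem.List.count by_p t : Int)))))))

-- ===== PRECONDITION & SPEC =====
-- Pre_ excludes exactly the inputs where Python A raises IndexError: sensitive_index out of range for some
-- row of x_test, or y_test/y_pred shorter than x_test.
def Pre_subclass_probablity (x_test : List (List Int)) (y_test : List Int) (y_pred : List Int) (sensitive_index : Int) : Prop :=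
  (∀ row ∈ x_test, -(row.length : Int) ≤ sensitive_index ∧ sensitive_index < (row.length : Int)) ∧
  x_test.length ≤ y_test.length ∧ x_test.length ≤ y_pred.length
instance (x_test : List (List Int)) (y_test : List Int) (y_pred : List Int) (sensitive_index : Int) : Decidable (Pre_subclass_probablity x_test y_test y_pred sensitive_index) := by unfold Pre_subclass_probablity; infer_instance

def pvWitness_subclass_probablity : List (List Int) × List Int × List Int × Int := ([[0], [1], [0]], [0, 1, 0], [1, 1, 0], 0)

def Spec_subclass_probablity (x_test : List (List Int)) (y_test : List Int) (y_pred : List Int) (sensitive_index : Int) (out : List (Int × List (Int × List (Int × Int)))) : Prop := out = subclass_probablity_alt x_test y_test y_pred sensitive_index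
instance (x_test : List (List Int)) (y_test : List Int) (y_pred : List Int) (sensitive_index : Int) (out : List (Int × List (Int × List (Int × Int)))) : Decidable (Spec_subclass_probablity x_test y_test y_pred sensitive_index out) := by unfold Spec_subclass_probablity; infer_instance

-- ===== CLAIM (what is proved, stated in full; the proofs are below) =====
def Claim_equal_subclass_probablity : Prop := ∀ (x_test : List (List Int)) (y_test : List Int) (y_pred : List Int) (sensitive_index : Int), Dom_subclass_probablity x_test y_test y_pred sensitive_index → Pre_subclass_probablity x_test y_test y_pred sensitive_index → Spec_subclass_probablity x_test y_test y_pred sensitive_index (subclass_probablity x_test y_test y_pred sensitive_index)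

-- ===== LEMMAS AND PROOFS =====

-- the three levels of A's update, factored out of its loop body
def step1 (d : PySem.Dict Int Int) (t : Int) : PySem.Dict Int Int :=
  match d.get? t with
  | some c => d.insert t (c + 1)
  | none   => d.insert t 1

def step2 (d : PySem.Dict Int (PySem.Dict Int Int)) (p t : Int) : PySem.Dict Int (PySem.Dict Int Int) :=
  match d.get? p with
  | some i => d.insert p (step1 i t)
  | none   => d.insert p (step1 PySem.Dict.empty t)

def step3 (d : PySem.Dict Int (PySem.Dict Int (PySem.Dict Int Int))) (w : Int × Int × Int) : PySem.Dict Int (PySem.Dict Int (PySem.Dict Int Int)) :=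
  match d.get? w.1 with
  | some i => d.insert w.1 (step2 i w.2.1 w.2.2)
  | none   => d.insert w.1 (step2 PySem.Dict.empty w.2.1 w.2.2)

-- B's group-by, one generic level: group the pairs by first component (key order = first appearance)
def nestOf {δ γ : Type} (F : List γ → δ) (M : List (Int × γ)) : PySem.Dict Int δ :=
  PySem.Dict.mk ((PySem.List.dedup (M.map (fun w => w.1))).map (fun k =>
    (k, F ((M.filter (fun w => w.1 == k)).map (fun w => w.2)))))

def nest1 (M : List Int) : PySem.Dict Int Int :=
  PySem.Dict.mk ((PySem.List.dedup M).map (fun t => (t, (PySem.List.count M t : Int))))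

def nest2 : List (Int × Int) → PySem.Dict Int (PySem.Dict Int Int) := nestOf nest1

def nest3 : List (Int × Int × Int) → PySem.Dict Int (PySem.Dict Int (PySem.Dict Int Int)) := nestOf nest2

lemma get?_mk_map {β : Type} (f : Int → β) (l : List Int) (hnd : l.Nodup) (s : Int) :
    (PySem.Dict.mk (l.map (fun k => (k, f k)))).get? s = if s ∈ l then some (f s) else none := by
  induction l with
  | nil => simp [PySem.Dict.get?]
  | cons k rest ih =>
    rw [List.map_cons, PySem.Dict.get?_mk_cons]
    rcases List.nodup_cons.mp hnd with ⟨hk, hr⟩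
    by_cases h : k = s
    · subst h; simp
    · simp [h, Ne.symm h, ih hr]

lemma dedup_append_singleton (M : List Int) (t : Int) :
    PySem.List.dedup (M ++ [t]) = if t ∈ M then PySem.List.dedup M else PySem.List.dedup M ++ [t] := by
  simp only [PySem.List.dedup_eq_ofList, PySem.Set.ofList_eq_foldl, List.foldl_append, List.foldl]
  rw [show List.foldl PySem.Set.add [] M = PySem.Set.ofList M from (PySem.Set.ofList_eq_foldl M).symm]
  by_cases h : t ∈ M
  · have : t ∈ PySem.Set.ofList M := (PySem.Set.mem_ofList M t).mpr h
    simp [PySem.Set.add, PySem.Set.contains, this, h]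
  · have : t ∉ PySem.Set.ofList M := fun hc => h ((PySem.Set.mem_ofList M t).mp hc)
    simp [PySem.Set.add, PySem.Set.contains, this, h]

lemma nest1_append (M : List Int) (t : Int) : nest1 (M ++ [t]) = step1 (nest1 M) t := by
  have hget : (nest1 M).get? t = if t ∈ PySem.List.dedup M then some ((PySem.List.count M t : Int)) else none :=
    get?_mk_map _ _ (PySem.List.nodup_dedup M) t
  by_cases h : t ∈ M
  · have hget' : (nest1 M).get? t = some ((PySem.List.count M t : Int)) := by rw [hget]; simp [h]
    have hcont : (nest1 M).contains t = true := by
      rw [PySem.Dict.contains_eq_isSome_get?, hget']; rfl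
    unfold step1
    rw [hget']
    apply PySem.Dict.ext
    rw [PySem.Dict.items_insert_of_contains _ _ hcont]
    show (PySem.List.dedup (M ++ [t])).map (fun u => (u, (PySem.List.count (M ++ [t]) u : Int)))
       = ((PySem.List.dedup M).map (fun u => (u, (PySem.List.count M u : Int)))).map
           (fun p => if (p.1 == t) = true then (t, (PySem.List.count M t : Int) + 1) else p)
    rw [dedup_append_singleton, if_pos h, List.map_map]
    apply List.map_congr_left
    intro u _
    by_cases hu : u = t
    · subst hu; simp [PySem.List.count, List.count_append]
    · simp [PySem.List.count, List.count_append, hu, Ne.symm hu]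
  · have hd : t ∉ PySem.List.dedup M := fun hc => h ((PySem.List.mem_dedup M t).mp hc)
    have hget' : (nest1 M).get? t = none := by rw [hget]; simp [h]
    have hcont : (nest1 M).contains t = false := by
      rw [PySem.Dict.contains_eq_isSome_get?, hget']; rfl
    unfold step1
    rw [hget']
    apply PySem.Dict.ext
    rw [PySem.Dict.items_insert_of_not_contains _ _ hcont]
    show (PySem.List.dedup (M ++ [t])).map (fun u => (u, (PySem.List.count (M ++ [t]) u : Int)))
       = (PySem.List.dedup M).map (fun u => (u, (PySem.List.count M u : Int))) ++ [(t, 1)]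
    rw [dedup_append_singleton, if_neg h, List.map_append]
    congr 1
    · apply List.map_congr_left
      intro u hu
      have : u ≠ t := fun he => h (he ▸ (PySem.List.mem_dedup M u).mp hu)
      simp [PySem.List.count, List.count_append, List.count_eq_zero, this]
    · have : M.count t = 0 := List.count_eq_zero.mpr h
      simp [PySem.List.count, List.count_append, this]

lemma nestOf_append {δ γ : Type} (F : List γ → δ) (G : δ → γ → δ) (e : δ)
    (hFG : ∀ N v, F (N ++ [v]) = G (F N) v) (hF0 : F [] = e)
    (M : List (Int × γ)) (k : Int) (v : γ) :
    nestOf F (M ++ [(k, v)]) =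
      (match (nestOf F M).get? k with
       | some i => (nestOf F M).insert k (G i v)
       | none   => (nestOf F M).insert k (G e v)) := by
  have hget : (nestOf F M).get? k = if k ∈ PySem.List.dedup (M.map (fun w => w.1)) then
      some (F ((M.filter (fun w => w.1 == k)).map (fun w => w.2))) else none := by
    unfold nestOf; exact get?_mk_map _ _ (PySem.List.nodup_dedup _) k
  by_cases h : k ∈ M.map (fun w => w.1)
  · have hget' : (nestOf F M).get? k = some (F ((M.filter (fun w => w.1 == k)).map (fun w => w.2))) := by
      rw [hget]; simp [h]
    have hcont : (nestOf F M).contains k = true := by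
      rw [PySem.Dict.contains_eq_isSome_get?, hget']; rfl
    rw [hget']
    apply PySem.Dict.ext
    rw [PySem.Dict.items_insert_of_contains _ _ hcont]
    show (PySem.List.dedup ((M ++ [(k, v)]).map (fun w => w.1))).map (fun k' =>
        (k', F (((M ++ [(k, v)]).filter (fun w => w.1 == k')).map (fun w => w.2))))
      = ((PySem.List.dedup (M.map (fun w => w.1))).map (fun k' =>
          (k', F ((M.filter (fun w => w.1 == k')).map (fun w => w.2))))).map
          (fun p => if (p.1 == k) = true then (k, G (F ((M.filter (fun w => w.1 == k)).map (fun w => w.2))) v) else p)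
    rw [List.map_append]
    simp only [List.map_cons, List.map_nil]
    rw [dedup_append_singleton, if_pos (by simpa using h), List.map_map]
    apply List.map_congr_left
    intro k' _
    by_cases hk : k' = k
    · subst hk
      simp [List.filter_append, hFG]
    · simp [List.filter_append, hk, Ne.symm hk]
  · have hget' : (nestOf F M).get? k = none := by rw [hget]; simp [h]
    have hcont : (nestOf F M).contains k = false := by
      rw [PySem.Dict.contains_eq_isSome_get?, hget']; rfl
    rw [hget']
    apply PySem.Dict.ext
    rw [PySem.Dict.items_insert_of_not_contains _ _ hcont]
    show (PySem.List.dedup ((M ++ [(k, v)]).map (fun w => w.1))).map (fun k' =>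
        (k', F (((M ++ [(k, v)]).filter (fun w => w.1 == k')).map (fun w => w.2))))
      = (PySem.List.dedup (M.map (fun w => w.1))).map (fun k' =>
          (k', F ((M.filter (fun w => w.1 == k')).map (fun w => w.2)))) ++ [(k, G e v)]
    rw [List.map_append]
    simp only [List.map_cons, List.map_nil]
    rw [dedup_append_singleton, if_neg (by simpa using h), List.map_append]
    congr 1
    · apply List.map_congr_left
      intro k' hk'
      have hk'M : k' ∈ List.map (fun w => w.1) M := (PySem.List.mem_dedup _ k').mp hk'
      have : k' ≠ k := fun he => h (he ▸ hk'M)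
      simp [List.filter_append, Ne.symm this]
    · have hnil : M.filter (fun w => w.1 == k) = [] := by
        rw [List.filter_eq_nil_iff]
        intro w hw hwk
        apply h
        rw [List.mem_map]
        exact ⟨w, hw, by simpa using hwk⟩
      have : F [v] = G e v := by
        have := hFG [] v
        rwa [hF0] at this
      simp [List.filter_append, hnil, this]

lemma nest2_append (M : List (Int × Int)) (p t : Int) : nest2 (M ++ [(p, t)]) = step2 (nest2 M) p t := by
  have := nestOf_append nest1 step1 PySem.Dict.empty nest1_append rfl M p t
  unfold nest2 step2
  rw [this]
  cases (nestOf nest1 M).get? p <;> rfl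

lemma nest3_append (L : List (Int × Int × Int)) (w : Int × Int × Int) :
    nest3 (L ++ [w]) = step3 (nest3 L) w := by
  obtain ⟨s, p, t⟩ := w
  have := nestOf_append nest2 (fun d v => step2 d v.1 v.2) PySem.Dict.empty
    (fun N v => nest2_append N v.1 v.2) rfl L s (p, t)
  unfold nest3 step3
  rw [this]
  cases (nestOf nest2 L).get? s <;> rfl

lemma foldl_step3 (L : List (Int × Int × Int)) : L.foldl step3 PySem.Dict.empty = nest3 L := by
  induction L using List.reverseRecOn with
  | nil => rfl
  | append_singleton I w ih => rw [List.foldl_append]; simp [ih, nest3_append]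

lemma stepA_eq (d : PySem.Dict Int (PySem.Dict Int (PySem.Dict Int Int))) (s p t : Int) :
    (match d.get? s with
     | some inner =>
       match inner.get? p with
       | some inner2 =>
         match inner2.get? t with
         | some c => d.insert s (inner.insert p (inner2.insert t (c + 1)))
         | none   => d.insert s (inner.insert p (inner2.insert t 1))
       | none => d.insert s (inner.insert p (PySem.Dict.empty.insert t 1))
     | none => d.insert s ((PySem.Dict.empty : PySem.Dict Int (PySem.Dict Int Int)).insert p (PySem.Dict.empty.insert t 1)))
    = step3 d (s, p, t) := by
  cases hd : d.get? s with
  | none => simp [step3, step2, step1, hd]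
  | some inner =>
    cases hp : inner.get? p with
    | none => simp [step3, step2, step1, hd, hp]
    | some inner2 =>
      cases ht : inner2.get? t with
      | none => simp [step3, step2, step1, hd, hp, ht]
      | some c => simp [step3, step2, step1, hd, hp, ht]

lemma enumerate_map_range (xs : List (List Int)) : ∀ n : Int,
    PySem.List.enumerate xs n = (List.range xs.length).map (fun (i : Nat) => (n + (i : Int), xs.getD i [])) := by
  induction xs with
  | nil => intro n; rfl
  | cons x tl ih =>
    intro n
    rw [show PySem.List.enumerate (x :: tl) n = (n, x) :: PySem.List.enumerate tl (n + 1) from rfl, ih]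
    rw [show (x :: tl).length = tl.length + 1 from rfl, List.range_succ_eq_map]
    simp only [List.map_cons, List.map_map]
    congr 1
    · simp
    apply List.map_congr_left
    intro i _
    simp [Function.comp]
    ring

-- ===== VERDICT (by name: the statement is the Claim_ definition above) =====
theorem subclass_probablity_spec : Claim_equal_subclass_probablity := by
  intro x_test y_test y_pred sensitive_index _ _
  unfold Spec_subclass_probablity subclass_probablity subclass_probablity_alt
  rw [enumerate_map_range x_test 0]
  have hf : (fun (data : PySem.Dict Int (PySem.Dict Int (PySem.Dict Int Int))) (i : Nat) =>
      let s := PySem.List.pyGetD (x_test.getD i []) sensitive_index 0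
      let p := PySem.List.pyGetD y_pred (i : Int) 0
      let t := PySem.List.pyGetD y_test (i : Int) 0
      match data.get? s with
      | some inner =>
        match inner.get? p with
        | some inner2 =>
          match inner2.get? t with
          | some c => data.insert s (inner.insert p (inner2.insert t (c + 1)))
          | none   => data.insert s (inner.insert p (inner2.insert t 1))
        | none => data.insert s (inner.insert p (PySem.Dict.empty.insert t 1))
      | none => data.insert s ((PySem.Dict.empty : PySem.Dict Int (PySem.Dict Int Int)).insert p (PySem.Dict.empty.insert t 1)))
      = fun data i => step3 data (PySem.List.pyGetD (x_test.getD i []) sensitive_index 0,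
          PySem.List.pyGetD y_pred (i : Int) 0, PySem.List.pyGetD y_test (i : Int) 0) :=
    funext fun d => funext fun i => stepA_eq d _ _ _
  rw [hf, show (fun (data : PySem.Dict Int (PySem.Dict Int (PySem.Dict Int Int))) (i : Nat) =>
        step3 data (PySem.List.pyGetD (x_test.getD i []) sensitive_index 0,
          PySem.List.pyGetD y_pred (i : Int) 0, PySem.List.pyGetD y_test (i : Int) 0))
      = fun data i => step3 data ((fun (i : Nat) => (PySem.List.pyGetD (x_test.getD i []) sensitive_index 0,
          PySem.List.pyGetD y_pred (i : Int) 0, PySem.List.pyGetD y_test (i : Int) 0)) i) from rfl,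
    ← List.foldl_map, foldl_step3]
  simp only [List.map_map, nest3, nest2, nestOf, nest1, Function.comp, zero_add]
  simp [Function.comp_def]
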